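-- pv_equiv track=rewrite | github.com/Blufix/it-glue-mcp-project | tests/scripts/test_document_infrastructure_tool.py | _check_malformed_markdown
-- ===== SOURCE A (Python) =====
-- def _check_malformed_markdown(content: str) -> bool:
--     """Check for malformed markdown."""
--     lines = content.split('\n')
--
--     # Basic markdown validation
--     malformed_indicators = [
--         # Unbalanced headers
--         lambda: len([line for line in lines if line.startswith('#')]) == 0,
--         # Headers without space
--         lambda: any(line.startswith('#') and len(line) > 1 and line[1] != ' ' for line in lines),
--         # Excessive consecutive blank lines
--         lambda: '\n\n\n\n' in content,
--     ]
--
--     return any(check() for check in malformed_indicators)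
-- ===== SOURCE B (Python) =====
-- def _check_malformed_markdown(content: str) -> bool:
--     """Check for malformed markdown (single character-level pass)."""
--     saw_header = False
--     bad_header = False
--     hash_pending = False
--     nl_run = 0
--     excessive = False
--     at_line_start = True
--     for c in content:
--         if hash_pending:
--             if c != '\n' and c != ' ':
--                 bad_header = True
--             hash_pending = False
--         if c == '\n':
--             nl_run += 1
--             if nl_run >= 4:
--                 excessive = True
--             at_line_start = True
--         else:
--             nl_run = 0
--             if at_line_start and c == '#':
--                 saw_header = True
--                 hash_pending = True
--             at_line_start = False
--     return (not saw_header) or bad_header or excessive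
-- ===== Notes on version B (the rewrite author's own statement) =====
-- stated objective: alternative
-- what changed: Replaced A's three separate scans (a line filter for headers, a per-line any for space-less headers, and a substring search for an excessive newline run) by a single character-level state machine over the string tracking line starts, an unresolved header marker, and the current newline-run length.
import Mathlib
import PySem

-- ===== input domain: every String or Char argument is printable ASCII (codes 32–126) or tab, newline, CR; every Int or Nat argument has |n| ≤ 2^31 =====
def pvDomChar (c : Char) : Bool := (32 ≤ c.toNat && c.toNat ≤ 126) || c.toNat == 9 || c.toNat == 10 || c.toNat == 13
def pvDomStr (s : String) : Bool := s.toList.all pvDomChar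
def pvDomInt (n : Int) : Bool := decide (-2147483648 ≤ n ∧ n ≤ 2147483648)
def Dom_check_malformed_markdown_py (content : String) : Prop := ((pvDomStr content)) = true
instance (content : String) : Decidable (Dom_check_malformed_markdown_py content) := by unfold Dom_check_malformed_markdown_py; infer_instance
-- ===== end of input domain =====

-- B replaces A's three separate scans (line filter, line any, substring search) by one
-- character-level pass maintaining header/blank-run state (objective: alternative).

-- ===== PORT A =====
def check_malformed_markdown_py (content : String) : Bool :=
  let lines := (PySem.Str.split? content "\n").getD []
  ((lines.filter (fun line => PySem.Str.startswith line "#")).length == 0)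
  || lines.any (fun line =>
        PySem.Str.startswith line "#" && decide (PySem.Str.len line > 1)
          && (PySem.Str.pyGet? line 1 != some ' '))
  || PySem.Str.isIn "\n\n\n\n" content

-- ===== PORT B =====
structure MDState where
  saw : Bool
  bad : Bool
  pending : Bool
  run : Int
  excess : Bool
  atStart : Bool
deriving Repr, DecidableEq

def mdStep (st : MDState) (c : Char) : MDState :=
  let st1 :=
    if st.pending then
      { st with bad := st.bad || (decide (c ≠ '\n') && decide (c ≠ ' ')), pending := false }
    else st
  if c == '\n' then
    let run := st1.run + 1
    { st1 with run := run, excess := st1.excess || decide (run ≥ 4), atStart := true }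
  else
    let st2 := { st1 with run := 0 }
    let st3 := if st2.atStart && c == '#' then { st2 with saw := true, pending := true } else st2
    { st3 with atStart := false }

def mdInit : MDState :=
  { saw := false, bad := false, pending := false, run := 0, excess := false, atStart := true }

def check_malformed_markdown_py_alt (content : String) : Bool :=
  let fin := content.toList.foldl mdStep mdInit
  !fin.saw || fin.bad || fin.excess

-- ===== PRECONDITION & SPEC =====
def Spec_check_malformed_markdown_py (content : String) (out : Bool) : Prop := out = check_malformed_markdown_py_alt content
instance (content : String) (out : Bool) : Decidable (Spec_check_malformed_markdown_py content out) := by unfold Spec_check_malformed_markdown_py; infer_instance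

-- ===== CLAIM (what is proved, stated in full; the proofs are below) =====
def Claim_equal_check_malformed_markdown_py : Prop := ∀ (content : String), Dom_check_malformed_markdown_py content → Spec_check_malformed_markdown_py content (check_malformed_markdown_py content)

-- ===== LEMMAS AND PROOFS =====

-- fuel-free model of content.split('\n') (sep a single newline)
def splitNl : List Char → List (List Char)
  | [] => [[]]
  | c :: cs =>
    if c = '\n' then [] :: splitNl cs
    else
      match splitNl cs with
      | t :: ts => (c :: t) :: ts
      | [] => [[c]]

theorem splitNl_ne_nil (cs : List Char) : splitNl cs ≠ [] := by
  cases cs with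
  | nil => simp [splitNl]
  | cons c cs =>
    simp only [splitNl]
    split
    · simp
    · split <;> simp_all

theorem go_spec (fuel : Nat) (l cur : List Char) (acc : List (List Char))
    (h : l.length < fuel) :
    PySem.Chars.splitOn.go ['\n'] fuel l cur acc
      = acc.reverse ++ (splitNl l).modifyHead (cur.reverse ++ ·) := by
  induction fuel generalizing l cur acc with
  | zero => omega
  | succ fuel ih =>
    cases l with
    | nil =>
      rw [PySem.Chars.splitOn.go]
      simp only [splitNl]
      simp
      omega
    | cons c rest =>
      rw [PySem.Chars.splitOn.go]
      by_cases hc : c = '\n'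
      · subst hc
        have hp : List.isPrefixOf ['\n'] ('\n' :: rest) = true := by
          simp [List.isPrefixOf]
        simp only [hp, if_pos]
        simp only [show List.drop ['\n'].length ('\n' :: rest) = rest from rfl]
        rw [ih rest [] (cur.reverse :: acc) (by simpa using Nat.lt_of_succ_lt_succ h)]
        cases hs : splitNl rest with
        | nil => exact absurd hs (splitNl_ne_nil rest)
        | cons t ts => simp [splitNl, hs, List.modifyHead]
      · have hp : List.isPrefixOf ['\n'] (c :: rest) = false := by
          simp [List.isPrefixOf]
          intro h; exact hc h.symm
        simp only [hp, Bool.false_eq_true, if_false]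
        rw [ih rest (c :: cur) acc (by simpa using Nat.lt_of_succ_lt_succ h)]
        simp only [splitNl, if_neg hc]
        cases hs : splitNl rest with
        | nil => exact absurd hs (splitNl_ne_nil rest)
        | cons t ts => simp [List.modifyHead, List.reverse_cons]

theorem splitOn_eq_splitNl (cs : List Char) :
    PySem.Chars.splitOn cs ['\n'] = splitNl cs := by
  rw [PySem.Chars.splitOn]
  rw [go_spec (cs.length + 1) cs [] [] (Nat.lt_succ_self _)]
  cases hs : splitNl cs with
  | nil => exact absurd hs (splitNl_ne_nil cs)
  | cons t ts => simp [List.modifyHead]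

-- line predicates matching A's per-line checks
def hdrLine (l : List Char) : Bool := l.head? == some '#'
def badLine (l : List Char) : Bool :=
  (l.head? == some '#') && (l[1]?.any (fun c => c ≠ ' '))

def nl4 : List Char := List.replicate 4 '\n'

theorem infix_iff_drop (sub s : List Char) : sub <:+: s ↔ ∃ j, sub <+: s.drop j := by
  rw [← PySem.Chars.isIn_iff_infix, ← PySem.Chars.exists_prefix_drop_iff_isIn]

-- head of the first line of splitNl
theorem head?_firstLine (cs : List Char) :
    ((splitNl cs).headI).head? = if cs.head? = some '\n' then none else cs.head? := by
  cases cs with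
  | nil => simp [splitNl]
  | cons c cs =>
    simp only [splitNl]
    by_cases hc : c = '\n'
    · simp [hc]
    · rw [if_neg hc]
      cases hs : splitNl cs with
      | nil => exact absurd hs (splitNl_ne_nil cs)
      | cons t ts => simp [hc, List.headI]

def pendBad (cs : List Char) : Bool :=
  match cs.head? with
  | none => false
  | some c => decide (c ≠ '\n') && decide (c ≠ ' ')

-- characterization of saw/bad through the fold (invariant: pending → ¬atStart)
theorem foldl_saw_bad (cs : List Char) (st : MDState)
    (hI : st.pending = true → st.atStart = false) :
    (cs.foldl mdStep st).saw
        = (st.saw || (st.atStart && hdrLine ((splitNl cs).headI))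
            || ((splitNl cs).tail).any hdrLine)
    ∧ (cs.foldl mdStep st).bad
        = (st.bad || (st.pending && pendBad cs)
            || (st.atStart && badLine ((splitNl cs).headI))
            || ((splitNl cs).tail).any badLine) := by
  induction cs generalizing st with
  | nil =>
    simp [splitNl, hdrLine, badLine, pendBad, List.headI]
  | cons c cs ih =>
    by_cases hc : c = '\n'
    · subst hc
      have hsb : (mdStep st '\n').saw = st.saw ∧ (mdStep st '\n').bad = st.bad ∧
          (mdStep st '\n').pending = false ∧ (mdStep st '\n').atStart = true := by
        simp only [mdStep]
        by_cases hp : st.pending = true <;> simp [hp]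
      obtain ⟨hsaw, hbad, hpend, hat⟩ := hsb
      rw [List.foldl_cons]
      obtain ⟨h1, h2⟩ := ih (mdStep st '\n') (by simp [hpend])
      rw [hsaw, hat] at h1
      rw [hbad, hpend, hat] at h2
      constructor
      · rw [h1]
        simp only [splitNl, if_pos rfl]
        cases hs : splitNl cs with
        | nil => exact absurd hs (splitNl_ne_nil cs)
        | cons t ts =>
          simp [hdrLine, List.headI, Bool.or_assoc]
      · rw [h2]
        simp only [splitNl, if_pos rfl]
        cases hs : splitNl cs with
        | nil => exact absurd hs (splitNl_ne_nil cs)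
        | cons t ts =>
          simp [badLine, pendBad, List.headI, Bool.or_assoc]
    · -- c ≠ '\n'
      rw [List.foldl_cons]
      have hcb : (c == '\n') = false := by simp [hc]
      by_cases ha : st.atStart = true
      · have hpend : st.pending = false := by
          cases hp : st.pending with
          | false => rfl
          | true => rw [hI hp] at ha; exact absurd ha (by simp)
        by_cases hh : c = '#'
        · subst hh
          have hstep : mdStep st '#' =
              { st with saw := true, pending := true, run := 0, atStart := false } := by
            simp [mdStep, hpend, ha]
          rw [hstep]
          obtain ⟨h1, h2⟩ :=
            ih { st with saw := true, pending := true, run := 0, atStart := false }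
              (fun _ => rfl)
          constructor
          · rw [h1]
            simp only [splitNl, if_neg hc]
            cases hs : splitNl cs with
            | nil => exact absurd hs (splitNl_ne_nil cs)
            | cons t ts =>
              simp [hdrLine, List.headI, ha]
          · rw [h2]
            simp only [splitNl, if_neg hc]
            cases hs : splitNl cs with
            | nil => exact absurd hs (splitNl_ne_nil cs)
            | cons t ts =>
              have hhead : t.head? = if cs.head? = some '\n' then none else cs.head? := by
                have := head?_firstLine cs
                rw [hs] at this; simpa [List.headI] using this
              simp only [List.tail_cons, hpend, ha, Bool.false_and, Bool.or_false,
                Bool.true_and, List.headI, badLine, hdrLine]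
              cases hcs : cs with
              | nil =>
                rw [hcs] at hs
                simp [splitNl] at hs
                simp [hs.1, pendBad]
              | cons d ds =>
                rw [hcs] at hhead
                by_cases hd : d = '\n'
                · simp [hd] at hhead
                  simp [pendBad, hhead, hd, ← List.head?_eq_getElem?]
                · simp [hd] at hhead
                  simp [pendBad, hhead, hd, ← List.head?_eq_getElem?, Bool.or_assoc]
        · -- at line start, c ≠ '#', c ≠ '\n'
          have hstep : mdStep st c = { st with run := 0, atStart := false } := by
            simp [mdStep, hpend, hcb, hh]
          rw [hstep]
          obtain ⟨h1, h2⟩ := ih { st with run := 0, atStart := false } (fun _ => rfl)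
          constructor
          · rw [h1]
            simp only [splitNl, if_neg hc]
            cases hs : splitNl cs with
            | nil => exact absurd hs (splitNl_ne_nil cs)
            | cons t ts => simp [hdrLine, List.headI, show (c == '#') = false by simp [hh]]
          · rw [h2]
            simp only [splitNl, if_neg hc]
            cases hs : splitNl cs with
            | nil => exact absurd hs (splitNl_ne_nil cs)
            | cons t ts => simp [badLine, List.headI, hpend, show (c == '#') = false by simp [hh]]
      · -- not at line start
        have ha' : st.atStart = false := by
          cases h : st.atStart with
          | false => rfl
          | true => exact absurd h ha
        have hstep : mdStep st c =
            { st with bad := st.bad || (st.pending && (decide (c ≠ '\n') && decide (c ≠ ' '))),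
                      pending := false, run := 0, atStart := false } := by
          simp only [mdStep, hcb]
          cases hp : st.pending with
          | true => simp [hp, ha']
          | false => simp [hp, ha']
        rw [hstep]
        obtain ⟨h1, h2⟩ :=
          ih { st with bad := st.bad || (st.pending && (decide (c ≠ '\n') && decide (c ≠ ' '))),
                       pending := false, run := 0, atStart := false } (fun _ => rfl)
        constructor
        · rw [h1]
          simp only [splitNl, if_neg hc]
          cases hs : splitNl cs with
          | nil => exact absurd hs (splitNl_ne_nil cs)
          | cons t ts => simp [ha']
        · rw [h2]
          simp only [splitNl, if_neg hc]
          cases hs : splitNl cs with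
          | nil => exact absurd hs (splitNl_ne_nil cs)
          | cons t ts => simp [ha', pendBad, hc, Bool.or_assoc]

-- an occurrence of nl4 cannot start inside a short newline block followed by a non-newline
theorem nl4_drop_block {r : Nat} {c : Char} {cs : List Char}
    (hr : r ≤ 3) (hc : c ≠ '\n')
    (h : nl4 <:+: (List.replicate r '\n' ++ c :: cs)) : nl4 <:+: cs := by
  rw [infix_iff_drop] at h ⊢
  obtain ⟨j, hj⟩ := h
  by_cases hjr : j ≤ r
  · exfalso
    obtain ⟨t', ht'⟩ := hj
    have hdrop : (List.replicate r '\n' ++ c :: cs).drop j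
        = List.replicate (r - j) '\n' ++ c :: cs := by
      rw [List.drop_append_of_le_length (by simpa using hjr), List.drop_replicate]
    rw [hdrop] at ht'
    have hL : (List.replicate (r - j) '\n' ++ c :: cs)[r - j]? = some c := by
      rw [List.getElem?_append_right (by simp)]
      simp
    have hlt : r - j < nl4.length := by
      simp only [nl4, List.length_replicate]
      omega
    have hR : (nl4 ++ t')[r - j]? = some '\n' := by
      rw [List.getElem?_append_left hlt]
      simp only [nl4, List.getElem?_replicate]
      rw [if_pos (by omega : r - j < 4)]
    rw [← ht'] at hL
    rw [hR] at hL
    exact hc (by injection hL with h; exact h.symm)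
  · refine ⟨j - (r + 1), ?_⟩
    have : (List.replicate r '\n' ++ c :: cs).drop j = cs.drop (j - (r + 1)) := by
      rw [List.drop_append]
      have h1 : List.drop j (List.replicate r '\n') = [] := by
        simp [List.drop_replicate]; omega
      rw [h1, List.nil_append]
      have h2 : j - (List.replicate r '\n').length = (j - r - 1) + 1 := by
        simp; omega
      rw [h2, List.drop_succ_cons]
      have h3 : j - r - 1 = j - (r + 1) := by omega
      rw [h3]
    rwa [this] at hj

-- characterization of excess through the fold
theorem foldl_excess (cs : List Char) (st : MDState) (r : Nat)
    (hr : st.run = (r : Int)) (hre : 4 ≤ r → st.excess = true) :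
    ((cs.foldl mdStep st).excess = true)
      ↔ (st.excess = true ∨ nl4 <:+: (List.replicate r '\n' ++ cs)) := by
  induction cs generalizing st r with
  | nil =>
    simp only [List.foldl_nil, List.append_nil]
    constructor
    · exact fun h => Or.inl h
    · rintro (h | h)
      · exact h
      · apply hre
        have := h.length_le
        simp only [nl4, List.length_replicate] at this
        omega
  | cons c cs ih =>
    by_cases hc : c = '\n'
    · subst hc
      have hdec : (decide ((r : Int) + 1 ≥ 4)) = decide (4 ≤ r + 1) := by
        apply decide_eq_decide.mpr
        constructor <;> intro h <;> omega
      have hprop : (mdStep st '\n').run = ((r + 1 : Nat) : Int)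
          ∧ (mdStep st '\n').excess = (st.excess || decide (4 ≤ r + 1)) := by
        refine ⟨?_, ?_⟩ <;> simp only [mdStep] <;>
          by_cases hp : st.pending = true <;> simp [hp, hr, hdec] <;> push_cast <;> ring
      obtain ⟨hrun, hex⟩ := hprop
      rw [List.foldl_cons,
        ih (mdStep st '\n') (r + 1) hrun (by intro h4; rw [hex]; simp; right; omega)]
      rw [hex]
      have hrep : List.replicate r '\n' ++ '\n' :: cs
          = List.replicate (r + 1) '\n' ++ cs := by
        rw [List.replicate_succ']
        simp
      rw [hrep]
      constructor
      · rintro (h | h)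
        · rcases Bool.or_eq_true_iff.mp h with h | h
          · exact Or.inl h
          · right
            have h4 : 4 ≤ r + 1 := of_decide_eq_true h
            have hpre : nl4 <+: List.replicate (r + 1) '\n' := by
              refine ⟨List.replicate (r + 1 - 4) '\n', ?_⟩
              rw [nl4, ← List.replicate_add]
              congr 1
              omega
            exact (hpre.trans (List.prefix_append _ _)).isInfix
        · exact Or.inr h
      · rintro (h | h)
        · exact Or.inl (by simp [h])
        · exact Or.inr h
    · -- c ≠ '\n': run resets to 0
      have hprop : (mdStep st c).run = ((0 : Nat) : Int)
          ∧ (mdStep st c).excess = st.excess := by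
        simp only [mdStep, show (c == '\n') = false by simp [hc]]
        by_cases hp : st.pending = true <;> by_cases ha : (st.atStart && (c == '#')) = true <;>
          simp [hp, ha]
      obtain ⟨hrun, hex⟩ := hprop
      rw [List.foldl_cons, ih (mdStep st c) 0 hrun (by omega), hex]
      simp only [List.replicate_zero, List.nil_append]
      constructor
      · rintro (h | h)
        · exact Or.inl h
        · exact Or.inr (h.trans (List.IsSuffix.isInfix
            ⟨List.replicate r '\n' ++ [c], by simp⟩))
      · rintro (h | h)
        · exact Or.inl h
        · by_cases hex4 : st.excess = true
          · exact Or.inl hex4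
          · have hr3 : r ≤ 3 := by
              by_contra hgt
              exact hex4 (hre (by omega))
            exact Or.inr (nl4_drop_block hr3 hc h)

-- bridge: A's per-line String predicates are hdrLine/badLine on the char lists
theorem startswith_ofList (t : List Char) :
    PySem.Str.startswith (String.ofList t) "#" = hdrLine t := by
  rw [PySem.Str.startswith, String.toList_ofList]
  refine Bool.eq_iff_iff.mpr ?_
  rw [PySem.Chars.startswith_iff, show ("#".toList) = ['#'] from rfl]
  cases t with
  | nil => simp [hdrLine]
  | cons a t =>
    simp only [List.cons_prefix_cons, List.nil_prefix, and_true, hdrLine, List.head?_cons,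
      Option.some.injEq, beq_iff_eq]
    exact ⟨fun h => h.symm, fun h => h.symm⟩

theorem badpred_ofList (t : List Char) :
    (PySem.Str.startswith (String.ofList t) "#" && decide (PySem.Str.len (String.ofList t) > 1)
      && (PySem.Str.pyGet? (String.ofList t) 1 != some ' ')) = badLine t := by
  rw [startswith_ofList, PySem.Str.len, PySem.Str.pyGet?, String.toList_ofList]
  cases t with
  | nil => simp [hdrLine, badLine]
  | cons a t =>
    cases t with
    | nil =>
      simp [hdrLine, badLine, PySem.Chars.pyGet?]
    | cons b t =>
      have hget : PySem.Chars.pyGet? (a :: b :: t) 1 = some b := by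
        simp [PySem.Chars.pyGet?, PySem.List.pyGet?, PySem.List.pyIdx?]
      have hlen : (decide ((↑(a :: b :: t).length : Int) > 1)) = true := by
        simp
      rw [hget, hlen]
      refine Bool.eq_iff_iff.mpr ?_
      simp [hdrLine, badLine, bne]

theorem filter_len_eq_any {α : Type} (l : List α) (f : α → Bool) :
    ((l.filter f).length == 0) = !l.any f := by
  induction l with
  | nil => simp
  | cons a l ih =>
    by_cases h : f a = true
    · simp [h]
    · simp [h, ih]

-- ===== VERDICT (by name: the statement is the Claim_ definition above) =====
theorem check_malformed_markdown_py_spec : Claim_equal_check_malformed_markdown_py := by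
  intro content _
  unfold Spec_check_malformed_markdown_py check_malformed_markdown_py check_malformed_markdown_py_alt
  dsimp only
  have hsplit : (PySem.Str.split? content "\n").getD []
      = (splitNl content.toList).map String.ofList := by
    rw [PySem.Str.split?, PySem.Chars.split?]
    simp [show "\n".toList = ['\n'] from rfl, splitOn_eq_splitNl]
  rw [hsplit]
  obtain ⟨hsaw, hbad⟩ := foldl_saw_bad content.toList mdInit (by simp [mdInit])
  have hAny : ∀ (p : List Char → Bool),
      ((splitNl content.toList).map String.ofList).any (fun s => p s.toList)
        = (p ((splitNl content.toList).headI)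
            || ((splitNl content.toList).tail).any p) := by
    intro p
    cases hs : splitNl content.toList with
    | nil => exact absurd hs (splitNl_ne_nil content.toList)
    | cons t ts =>
      simp [List.any_map, Function.comp_def, List.headI, String.toList_ofList]
  have hf1 : ∀ s : String, (PySem.Str.startswith s "#") = hdrLine s.toList := by
    intro s
    rw [← startswith_ofList s.toList, String.ofList_toList]
  have hf2 : ∀ s : String,
      (PySem.Str.startswith s "#" && decide (PySem.Str.len s > 1)
        && (PySem.Str.pyGet? s 1 != some ' ')) = badLine s.toList := by
    intro s
    rw [← badpred_ofList s.toList, String.ofList_toList]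
  have e1 : ((((splitNl content.toList).map String.ofList).filter
        (fun line => PySem.Str.startswith line "#")).length == 0)
      = !(content.toList.foldl mdStep mdInit).saw := by
    rw [filter_len_eq_any, hsaw]
    simp only [hf1]
    rw [hAny hdrLine]
    simp [mdInit]
  have e2 : (((splitNl content.toList).map String.ofList).any (fun line =>
        PySem.Str.startswith line "#" && decide (PySem.Str.len line > 1)
          && (PySem.Str.pyGet? line 1 != some ' ')))
      = (content.toList.foldl mdStep mdInit).bad := by
    rw [hbad]
    simp only [hf2]
    rw [hAny badLine]
    simp [mdInit]
  have e3 : PySem.Str.isIn "\n\n\n\n" content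
      = (content.toList.foldl mdStep mdInit).excess := by
    cases hex : (content.toList.foldl mdStep mdInit).excess with
    | true =>
      have := (foldl_excess content.toList mdInit 0 rfl (by omega)).mp hex
      rcases this with h | h
      · exact absurd h (by simp [mdInit])
      · rw [PySem.Str.isIn]
        rw [PySem.Chars.isIn_iff_infix]
        simpa [nl4, show ("\n\n\n\n").toList = List.replicate 4 '\n' from rfl] using h
    | false =>
      cases hin : PySem.Str.isIn "\n\n\n\n" content with
      | false => rfl
      | true =>
        exfalso
        rw [PySem.Str.isIn, PySem.Chars.isIn_iff_infix] at hin
        have h0 : nl4 <:+: (List.replicate 0 '\n' ++ content.toList) := by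
          simpa [nl4, show ("\n\n\n\n").toList = List.replicate 4 '\n' from rfl] using hin
        have := (foldl_excess content.toList mdInit 0 rfl (by omega)).mpr (Or.inr h0)
        rw [hex] at this
        exact Bool.false_ne_true this
  rw [e1, e2, e3]
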